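-- pv_equiv track=rewrite | github.com/victoriavals/simple-multi-agent-cv-analyzer | src/agents/report_agent.py | _diff_lists
-- ===== SOURCE A (Python) =====
-- from typing import Any, Dict, List
--
-- def _diff_lists(candidate: List[str], market: List[str]) -> Dict[str, List[str]]:
--     set_c = set([x.lower() for x in candidate])
--     set_m = set([x.lower() for x in market])
--     return {
--         "strengths": sorted(set_c.intersection(set_m)),
--         "gaps": sorted(set_m - set_c),
--         "extras": sorted(set_c - set_m),
--     }
-- ===== SOURCE B (Python) =====
-- from typing import Dict, List
--
-- def _diff_lists(candidate: List[str], market: List[str]) -> Dict[str, List[str]]: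
--     sc = sorted({x.lower() for x in candidate})
--     sm = sorted({x.lower() for x in market})
--     strengths, gaps, extras = [], [], []
--     i = j = 0
--     while i < len(sc) and j < len(sm):
--         if sc[i] == sm[j]:
--             strengths.append(sc[i]); i += 1; j += 1
--         elif sc[i] < sm[j]:
--             extras.append(sc[i]); i += 1
--         else:
--             gaps.append(sm[j]); j += 1
--     extras.extend(sc[i:])
--     gaps.extend(sm[j:])
--     return {"strengths": strengths, "gaps": gaps, "extras": extras}
-- ===== Notes on version B (the rewrite author's own statement) =====
-- stated objective: alternative
-- what changed: Replaces A's three set-algebra operations each followed by its own sort with a single two-pointer merge-join over the two sorted deduplicated lowercase lists, classifying each element into strengths/gaps/extras in one pass.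
import Mathlib
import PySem

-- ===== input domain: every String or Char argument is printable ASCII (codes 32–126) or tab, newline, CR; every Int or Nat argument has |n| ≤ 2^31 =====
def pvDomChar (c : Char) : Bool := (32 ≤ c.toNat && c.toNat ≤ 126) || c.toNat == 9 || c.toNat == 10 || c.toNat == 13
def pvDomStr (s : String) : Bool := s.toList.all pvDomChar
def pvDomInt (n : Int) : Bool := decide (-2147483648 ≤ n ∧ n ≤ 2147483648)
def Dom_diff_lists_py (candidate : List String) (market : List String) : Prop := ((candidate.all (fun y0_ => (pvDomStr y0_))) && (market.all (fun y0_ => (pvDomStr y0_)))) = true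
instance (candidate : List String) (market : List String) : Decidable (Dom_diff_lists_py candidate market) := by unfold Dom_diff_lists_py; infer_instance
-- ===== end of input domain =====

-- B replaces A's three set operations followed by three sorts with a single two-pointer
-- merge-join over the two sorted deduplicated lists (objective: alternative algorithm).

-- ===== PORT A =====
def diff_lists_py (candidate : List String) (market : List String) : List (String × List String) :=
  let set_c := PySem.Set.ofList (candidate.map (fun x => PySem.Str.lower x))
  let set_m := PySem.Set.ofList (market.map (fun x => PySem.Str.lower x))
  [("strengths", PySem.List.sorted (PySem.Set.inter set_c set_m) (fun x => x) false),
   ("gaps", PySem.List.sorted (PySem.Set.diff set_m set_c) (fun x => x) false),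
   ("extras", PySem.List.sorted (PySem.Set.diff set_c set_m) (fun x => x) false)]

-- ===== PORT B =====
-- the while-loop with indices i, j of Source B, as structural recursion over the two sorted lists;
-- the trailing extends are the base cases
def pvMerge : List String → List String → List String × List String × List String
  | [], ys => ([], ys, [])
  | x :: xs, [] => ([], [], x :: xs)
  | x :: xs, y :: ys =>
    if x = y then
      let r := pvMerge xs ys
      (x :: r.1, r.2.1, r.2.2)
    else if x < y then
      let r := pvMerge xs (y :: ys)
      (r.1, r.2.1, x :: r.2.2)
    else
      let r := pvMerge (x :: xs) ys
      (r.1, y :: r.2.1, r.2.2)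
  termination_by xs ys => xs.length + ys.length

def diff_lists_py_alt (candidate : List String) (market : List String) : List (String × List String) :=
  let sc := PySem.List.sorted (PySem.Set.ofList (candidate.map (fun x => PySem.Str.lower x))) (fun x => x) false
  let sm := PySem.List.sorted (PySem.Set.ofList (market.map (fun x => PySem.Str.lower x))) (fun x => x) false
  let r := pvMerge sc sm
  [("strengths", r.1), ("gaps", r.2.1), ("extras", r.2.2)]

-- ===== PRECONDITION & SPEC =====
def Spec_diff_lists_py (candidate : List String) (market : List String) (out : List (String × List String)) : Prop := out = diff_lists_py_alt candidate market
instance (candidate : List String) (market : List String) (out : List (String × List String)) : Decidable (Spec_diff_lists_py candidate market out) := by unfold Spec_diff_lists_py; infer_instance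

-- ===== CLAIM (what is proved, stated in full; the proofs are below) =====
def Claim_equal_diff_lists_py : Prop := ∀ (candidate : List String) (market : List String), Dom_diff_lists_py candidate market → Spec_diff_lists_py candidate market (diff_lists_py candidate market)

-- ===== LEMMAS AND PROOFS =====

-- on strictly increasing lists, the merge-join computes exactly intersection / right-diff / left-diff
lemma pvMerge_eq (xs ys : List String) :
    xs.Pairwise (· < ·) → ys.Pairwise (· < ·) →
    pvMerge xs ys =
      (xs.filter (fun a => decide (a ∈ ys)),
       ys.filter (fun a => decide (a ∉ xs)),
       xs.filter (fun a => decide (a ∉ ys))) := by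
  fun_induction pvMerge xs ys with
  | case1 ys => intro _ _; simp [List.filter]
  | case2 x xs => intro _ _; simp [List.filter]
  | case3 xs y ys r ih =>
    intro hx hy
    have hxa : ∀ a ∈ xs, y < a := fun a ha => (List.pairwise_cons.1 hx).1 a ha
    have hyb : ∀ a ∈ ys, y < a := fun a ha => (List.pairwise_cons.1 hy).1 a ha
    simp only [r, ih (List.pairwise_cons.1 hx).2 (List.pairwise_cons.1 hy).2]
    simp
    exact ⟨List.filter_congr fun a ha => by simp [ne_of_gt (hxa a ha)],
      List.filter_congr fun a ha => by simp [ne_of_gt (hyb a ha)],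
      List.filter_congr fun a ha => by simp [ne_of_gt (hxa a ha)]⟩
  | case4 x xs y ys hne hlt r ih =>
    intro hx hy
    have hxy : ∀ a ∈ y :: ys, x < a := by
      intro a ha
      rcases List.mem_cons.1 ha with rfl | ha
      · exact hlt
      · exact lt_trans hlt ((List.pairwise_cons.1 hy).1 a ha)
    have hx0 : x ∉ y :: ys := fun hm => lt_irrefl x (hxy x hm)
    have hx1 : x ∉ ys := fun hm => hx0 (List.mem_cons_of_mem _ hm)
    simp only [r, ih (List.pairwise_cons.1 hx).2 hy]
    simp
    refine ⟨?_, ?_, ?_⟩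
    · simp [hne, hx1]
    · exact List.filter_congr fun a ha => by
        have : a ≠ x := ne_of_gt (hxy a ha)
        simp [this]
    · simp [hne, hx1]
  | case5 x xs y ys hne hnlt r ih =>
    intro hx hy
    have hgt : y < x := lt_of_le_of_ne (le_of_not_gt hnlt) (fun h => hne h.symm)
    have hyx : ∀ a ∈ x :: xs, y < a := by
      intro a ha
      rcases List.mem_cons.1 ha with rfl | ha
      · exact hgt
      · exact lt_trans hgt ((List.pairwise_cons.1 hx).1 a ha)
    have hy0 : y ∉ x :: xs := fun hm => lt_irrefl y (hyx y hm)
    have hy1 : y ∉ xs := fun hm => hy0 (List.mem_cons_of_mem _ hm)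
    have hyne : ¬y = x := fun h => hne h.symm
    simp only [r, ih hx (List.pairwise_cons.1 hy).2]
    simp
    refine ⟨?_, ?_, ?_⟩
    · exact List.filter_congr fun a ha => by
        have : a ≠ y := ne_of_gt (hyx a ha)
        simp [this]
    · simp [hyne, hy1]
    · exact List.filter_congr fun a ha => by
        have : a ≠ y := ne_of_gt (hyx a ha)
        simp [this]

-- sorted(s.filter(t.contains)) is the membership filter of sorted(s), when sorted(s) is strictly increasing
lemma sorted_filter_mem (s t : List String)
    (hs : (PySem.List.sorted s (fun x => x) false).Pairwise (· < ·)) :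
    PySem.List.sorted (s.filter (fun a => PySem.Set.contains t a)) (fun x => x) false
      = (PySem.List.sorted s (fun x => x) false).filter
          (fun a => decide (a ∈ PySem.List.sorted t (fun x => x) false)) := by
  apply PySem.List.sorted_eq_of_perm_of_pairwise_lt
  · refine ((PySem.List.sorted_perm s _ false).filter _).trans (List.Perm.of_eq ?_)
    exact List.filter_congr (fun a _ => by
      simp [PySem.Set.contains, PySem.List.mem_sorted])
  · exact hs.filter _

-- same for the negated membership filter (set difference)
lemma sorted_filter_not_mem (s t : List String)
    (hs : (PySem.List.sorted s (fun x => x) false).Pairwise (· < ·)) :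
    PySem.List.sorted (s.filter (fun a => !PySem.Set.contains t a)) (fun x => x) false
      = (PySem.List.sorted s (fun x => x) false).filter
          (fun a => decide (a ∉ PySem.List.sorted t (fun x => x) false)) := by
  apply PySem.List.sorted_eq_of_perm_of_pairwise_lt
  · refine ((PySem.List.sorted_perm s _ false).filter _).trans (List.Perm.of_eq ?_)
    exact List.filter_congr (fun a _ => by
      simp [PySem.Set.contains, PySem.List.mem_sorted])
  · exact hs.filter _

-- ===== VERDICT (by name: the statement is the Claim_ definition above) =====
theorem diff_lists_py_spec : Claim_equal_diff_lists_py := by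
  intro candidate market _
  have hc := PySem.List.sorted_ofList_pairwise_lt (candidate.map (fun x => PySem.Str.lower x))
  have hm := PySem.List.sorted_ofList_pairwise_lt (market.map (fun x => PySem.Str.lower x))
  simp only [Spec_diff_lists_py, diff_lists_py, diff_lists_py_alt,
    PySem.Set.inter, PySem.Set.diff,
    pvMerge_eq _ _ hc hm,
    sorted_filter_mem _ _ hc, sorted_filter_not_mem _ _ hm, sorted_filter_not_mem _ _ hc]
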